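/- GENERATED by farm/mkstatement.py from design/units.tsv (unit `stb_vorbis_get_frame_float.5`) and the assertions of Vorbis/Spec/GetFrameFloat.lean — do not edit.
   THE STATEMENT of the proof unit `stb_vorbis_get_frame_float.5`: segment 5 of `stb_vorbis_get_frame_float` (25 instructions; entries 0x119806;
   exits 0x119769; ranges 0x119806-0x119870)
   takes each of its entry assertions to one of its exit assertions (`Vorbis.Spec.stb_vorbis_get_frame_float.Seg5`), given the contracts of its callees.
   What the names mean: Vorbis/Spec/Basic.lean (the shared hypotheses), Vorbis/Spec/GetFrameFloat.lean (the assertions). The theorem to prove: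
   `theorem stb_vorbis_get_frame_float_5_ok : Vorbis.Spec.stb_vorbis_get_frame_float_5.Statement`. -/
import Vorbis.Spec.GetFrameFloat
namespace Vorbis.Spec.stb_vorbis_get_frame_float_5
open X86 X86.User Asan

/-- The statement of unit `stb_vorbis_get_frame_float.5`. -/
def Statement : Prop :=
  ∀ (Lay : Layout) (_hLay : Lay.hi = 0x1000000) (μ : Microarch) (_hμ : UserX.MicroOK μ) (u₀ : State)
    (_hcode : HasCodeNat Lay u₀ Vorbis.L.stb_vorbis_get_frame_float.entry Vorbis.Code.code_stb_vorbis_get_frame_float.nat Vorbis.L.stb_vorbis_get_frame_float.size)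
    (_h_asan_store4_noabort : Asan.SmallCheck Lay μ Vorbis.WayInv (Vorbis.CodeOK u₀) [.rax, .rcx, .rdx] 4 Vorbis.L.__asan_store4_noabort.entry)
    (_h_asan_store8_noabort : Asan.SmallCheck Lay μ Vorbis.WayInv (Vorbis.CodeOK u₀) [.rax, .rcx, .rdx] 8 Vorbis.L.__asan_store8_noabort.entry),
    Vorbis.Spec.stb_vorbis_get_frame_float.Seg5 Lay μ u₀

end Vorbis.Spec.stb_vorbis_get_frame_float_5
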